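-- pv_equiv track=rewrite | github.com/weltlink/django-quickbooks | django_quickbooks/utils.py | xml_encode
-- ===== SOURCE A (Python) =====
-- def xml_encode(value: str):
--     transform = {
--         '&': '&amp;',
--         '<': '&lt;',
--         '>': '&gt;',
--         '"': '&quot;',
--     }
--     for transform_key, transform_value in transform.items():
--         value = value.replace(transform_key, transform_value)
--     return value
-- ===== SOURCE B (Python) =====
-- def xml_encode(value: str):
--     transform = {
--         '&': '&amp;',
--         '<': '&lt;',
--         '>': '&gt;',
--         '"': '&quot;',
--     }
--     return ''.join(transform.get(c, c) for c in value)
-- ===== Notes on version B (the rewrite author's own statement) =====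
-- stated objective: alternative
-- what changed: B makes a single character-by-character pass emitting each char's escape from the dict, instead of A's four sequential full-string replace passes.
import Mathlib
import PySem

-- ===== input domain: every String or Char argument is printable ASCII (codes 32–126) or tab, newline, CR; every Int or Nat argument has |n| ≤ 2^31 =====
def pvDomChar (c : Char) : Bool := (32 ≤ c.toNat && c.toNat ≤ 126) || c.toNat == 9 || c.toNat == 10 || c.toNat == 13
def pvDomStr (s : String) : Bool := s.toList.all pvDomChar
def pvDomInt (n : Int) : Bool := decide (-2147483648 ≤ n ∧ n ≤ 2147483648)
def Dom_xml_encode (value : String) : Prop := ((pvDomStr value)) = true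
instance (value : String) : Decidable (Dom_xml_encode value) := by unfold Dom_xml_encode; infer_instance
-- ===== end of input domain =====

-- B replaces A's four sequential full-string replace passes by one character-by-character
-- pass over the string, emitting each character's escape from the same dict (objective: alternative).

-- ===== PORT A =====
def xml_encode (value : String) : String :=
  let v1 := PySem.Str.replace value "&" "&amp;"
  let v2 := PySem.Str.replace v1 "<" "&lt;"
  let v3 := PySem.Str.replace v2 ">" "&gt;"
  PySem.Str.replace v3 "\"" "&quot;"

-- ===== PORT B =====
def xmlTransform : PySem.Dict Char String :=
  ((((PySem.Dict.empty).insert '&' "&amp;").insert '<' "&lt;").insert '>' "&gt;").insert '"' "&quot;"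

def xml_encode_alt (value : String) : String :=
  PySem.Str.join "" (value.toList.map (fun c => xmlTransform.getD c (String.ofList [c])))

-- ===== PRECONDITION & SPEC =====
def Spec_xml_encode (value : String) (out : String) : Prop := out = xml_encode_alt value
instance (value : String) (out : String) : Decidable (Spec_xml_encode value out) := by unfold Spec_xml_encode; infer_instance

-- ===== CLAIM (what is proved, stated in full; the proofs are below) =====
def Claim_equal_xml_encode : Prop := ∀ (value : String), Dom_xml_encode value → Spec_xml_encode value (xml_encode value)

-- ===== LEMMAS AND PROOFS =====

-- single-character replace is a flatMap over the characters
theorem replace_single_flatMap (o : Char) (new : List Char) (cs : List Char) :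
    PySem.Chars.replace cs [o] new = cs.flatMap (fun c => if c = o then new else [c]) := by
  show (if ([o] : List Char).isEmpty then _ else PySem.Chars.replace.go [o] new cs.length cs []) = _
  simp only [List.isEmpty_cons]
  suffices h : ∀ (fuel : Nat) (cs acc : List Char), cs.length ≤ fuel →
      PySem.Chars.replace.go [o] new fuel cs acc
        = acc.reverse ++ cs.flatMap (fun c => if c = o then new else [c]) by
    simpa using h cs.length cs [] le_rfl
  intro fuel
  induction fuel with
  | zero => intro cs acc h; interval_cases hl : cs.length; simp_all [PySem.Chars.replace.go, List.length_eq_zero_iff.mp hl]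
  | succ n ih =>
    intro cs acc h
    cases cs with
    | nil => simp [PySem.Chars.replace.go]
    | cons c t =>
      simp only [PySem.Chars.replace.go]
      by_cases hc : c = o
      · subst hc
        simp only [List.isPrefixOf, BEq.rfl, Bool.true_and, if_true,
          List.length_nil, List.length_cons, List.drop_succ_cons, List.drop_zero]
        rw [ih t _ (by simpa using h)]
        simp [List.flatMap_cons]
      · have : ([o].isPrefixOf (c :: t)) = false := by
          simp [List.isPrefixOf]; exact fun hco => (hc hco.symm).elim
        rw [this]
        simp only [Bool.false_eq_true, if_false]
        rw [ih t _ (by simpa using h)]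
        simp [List.flatMap_cons, hc]

theorem intersperse_nil_flatten (l : List (List Char)) :
    (List.intersperse ([] : List Char) l).flatten = l.flatten := by
  induction l with
  | nil => rfl
  | cons x t ih => cases t <;> simp_all [List.intersperse]

-- composing two single-char replaces over flatMap
theorem flatMap_flatMap (cs : List Char) (f g : Char → List Char) :
    (cs.flatMap f).flatMap g = cs.flatMap (fun c => (f c).flatMap g) := by
  simp [List.flatMap_assoc]

def escChar (c : Char) : List Char :=
  if c = '&' then "&amp;".toList
  else if c = '<' then "&lt;".toList
  else if c = '>' then "&gt;".toList
  else if c = '"' then "&quot;".toList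
  else [c]

theorem alt_toList (value : String) :
    (xml_encode_alt value).toList = value.toList.flatMap escChar := by
  rw [xml_encode_alt, PySem.Str.toList_join]
  show PySem.Chars.join [] _ = _
  rw [PySem.Chars.join, List.intercalate, intersperse_nil_flatten, List.map_map, List.flatMap_def]
  congr 1
  apply List.map_congr_left
  intro c _
  show (String.toList ∘ fun c => xmlTransform.getD c (String.ofList [c])) c = escChar c
  simp only [Function.comp]
  by_cases h1 : c = '&'; · subst h1; rfl
  by_cases h2 : c = '<'; · subst h2; rfl
  by_cases h3 : c = '>'; · subst h3; rfl
  by_cases h4 : c = '"'; · subst h4; rfl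
  simp only [escChar, if_neg h1, if_neg h2, if_neg h3, if_neg h4]
  simp only [xmlTransform, PySem.Dict.getD, PySem.Dict.get?, PySem.Dict.insert, PySem.Dict.empty]
  rw [List.find?_eq_none.mpr ?_]
  · simp only [Option.map_none, Option.getD_none, String.toList_ofList]
  · intro x hx
    rcases List.mem_cons.mp hx with rfl | hx
    · exact fun h => h1 (beq_iff_eq.mp h).symm
    rcases List.mem_cons.mp hx with rfl | hx
    · exact fun h => h2 (beq_iff_eq.mp h).symm
    rcases List.mem_cons.mp hx with rfl | hx
    · exact fun h => h3 (beq_iff_eq.mp h).symm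
    rcases List.mem_cons.mp hx with rfl | hx
    · exact fun h => h4 (beq_iff_eq.mp h).symm
    exact absurd hx (List.not_mem_nil)

theorem a_toList (value : String) :
    (xml_encode value).toList = value.toList.flatMap escChar := by
  simp only [xml_encode, PySem.Str.toList_replace]
  rw [show "&".toList = ['&'] from rfl, show "<".toList = ['<'] from rfl,
    show ">".toList = ['>'] from rfl, show "\"".toList = ['"'] from rfl]
  rw [replace_single_flatMap, replace_single_flatMap, replace_single_flatMap,
    replace_single_flatMap, flatMap_flatMap, flatMap_flatMap, flatMap_flatMap]
  congr 1
  funext c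
  by_cases h1 : c = '&'; · subst h1; rfl
  by_cases h2 : c = '<'; · subst h2; rfl
  by_cases h3 : c = '>'; · subst h3; rfl
  by_cases h4 : c = '"'; · subst h4; rfl
  simp [escChar, h1, h2, h3, h4]

-- ===== VERDICT (by name: the statement is the Claim_ definition above) =====
theorem xml_encode_spec : Claim_equal_xml_encode := by
  intro value _
  show xml_encode value = xml_encode_alt value
  have h := (a_toList value).trans (alt_toList value).symm
  calc xml_encode value = String.ofList (xml_encode value).toList := String.ofList_toList.symm
    _ = String.ofList (xml_encode_alt value).toList := by rw [h]
    _ = xml_encode_alt value := String.ofList_toList
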